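-- pv_equiv track=rewrite | github.com/SihengLi99/TextBind | app.py | split_model_output
-- ===== SOURCE A (Python) =====
-- def split_model_output(gen_text, use_image_id):
--     if not use_image_id:
--         gen_text_splits = gen_text.split("<image>")
--         return gen_text_splits
--     else:
--         gen_text_splits, image_order = [], []
--         gen_text_words = gen_text.split()
--         cache = []
--         for wi, w in enumerate(gen_text_words):
--             if w.startswith("<image"):
--                 gen_text_splits.append(" ".join(cache))
--                 cache = []
--                 image_order.append(int(w[len("<image"):-1]))
--             else:
--                 cache.append(w)
--         if cache:
--             gen_text_splits.append(" ".join(cache))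
--         return gen_text_splits, image_order
-- ===== SOURCE B (Python) =====
-- def split_model_output(gen_text, use_image_id):
--     if not use_image_id:
--         gen_text_splits = gen_text.split("<image>")
--         return gen_text_splits
--     else:
--         gen_text_splits, image_order = [], []
--         rest = gen_text.split()
--         while True:
--             # advance to the first image token of the remaining words
--             i = 0
--             while i < len(rest) and not rest[i].startswith("<image"):
--                 i += 1
--             if i == len(rest):
--                 if rest:
--                     gen_text_splits.append(" ".join(rest))
--                 return gen_text_splits, image_order
--             gen_text_splits.append(" ".join(rest[:i]))
--             image_order.append(int(rest[i][len("<image"):-1]))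
--             rest = rest[i + 1:]
-- ===== Notes on version B (the rewrite author's own statement) =====
-- stated objective: alternative
-- what changed: The cache-accumulator scan over every word (with end-of-loop flush) is replaced by a cut-point loop that repeatedly finds the next '<image...' token and slices off the whole non-image segment before it at once; Pre_ excludes use_image_id=False, where A returns a bare list instead of the declared (list, list) pair, and image words whose payload is not an int literal, where both raise ValueError.
-- outside the precondition, e.g. on split_model_output('a<image>b', False): A returns ('a', 'b'), B returns ('a', 'b'); on split_model_output('<image>', True): A raises ValueError, B raises ValueError
import Mathlib
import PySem

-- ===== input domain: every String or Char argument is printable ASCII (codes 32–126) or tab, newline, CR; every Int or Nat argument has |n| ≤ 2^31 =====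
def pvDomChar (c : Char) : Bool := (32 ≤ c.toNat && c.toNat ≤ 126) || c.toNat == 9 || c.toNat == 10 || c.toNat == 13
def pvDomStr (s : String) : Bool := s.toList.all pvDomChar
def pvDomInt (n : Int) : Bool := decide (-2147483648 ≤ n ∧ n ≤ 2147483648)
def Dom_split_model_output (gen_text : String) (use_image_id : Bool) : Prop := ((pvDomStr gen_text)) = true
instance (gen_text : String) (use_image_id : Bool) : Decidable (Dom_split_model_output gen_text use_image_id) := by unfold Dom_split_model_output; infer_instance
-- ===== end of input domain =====

-- B replaces A's per-word cache accumulator by a cut-point loop that slices off whole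
-- non-image segments at the next '<image' token; alternative decomposition, same cost.


-- shared helpers (both Pythons use the identical sub-expressions)
def pvStarts (w : String) : Bool := PySem.Str.startswith w "<image"
-- int(w[len("<image"):-1]); Pre_ guarantees ofStr? = some (Python raises ValueError otherwise)
def pvParse (w : String) : Int := (PySem.Int.ofStr? (PySem.Str.slice w (some 6) (some (-1)))).getD 0

-- ===== PORT A =====
-- one step of A's for-loop over the words: state = (gen_text_splits, image_order, cache)
def pvStepA (st : List String × List Int × List String) (w : String) : List String × List Int × List String :=
  if pvStarts w then (st.1 ++ [PySem.Str.join " " st.2.2], st.2.1 ++ [pvParse w], [])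
  else (st.1, st.2.1, st.2.2 ++ [w])

def split_model_output (gen_text : String) (use_image_id : Bool) : List String × List Int :=
  if !use_image_id then
    -- Python returns the bare list here (not a pair); second component is vacuous, excluded by Pre_
    ((PySem.Str.split? gen_text "<image>").getD [], [])
  else
    let st := (PySem.Str.split₀ gen_text).foldl pvStepA ([], [], [])
    (if st.2.2.isEmpty then st.1 else st.1 ++ [PySem.Str.join " " st.2.2], st.2.1)

-- ===== PORT B =====
-- B's outer while-loop; the inner 'while i < len(rest) and not …' index scan is ported as the
-- takeWhile/dropWhile split of rest at its first image token (exact: rest[:i] / rest[i:]).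
def pvGoB (splits : List String) (order : List Int) (rest : List String) : List String × List Int :=
  let seg := rest.takeWhile (fun w => !pvStarts w)
  match h : rest.dropWhile (fun w => !pvStarts w) with
  | [] => (if rest.isEmpty then splits else splits ++ [PySem.Str.join " " rest], order)
  | w :: rest' => pvGoB (splits ++ [PySem.Str.join " " seg]) (order ++ [pvParse w]) rest'
termination_by rest.length
decreasing_by
  have : (rest.dropWhile (fun w => !pvStarts w)).length ≤ rest.length := List.length_dropWhile_le _ _
  simp [h] at this; omega

def split_model_output_alt (gen_text : String) (use_image_id : Bool) : List String × List Int :=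
  if !use_image_id then ((PySem.Str.split? gen_text "<image>").getD [], [])
  else pvGoB [] [] (PySem.Str.split₀ gen_text)

-- ===== PRECONDITION & SPEC =====
-- Pre_ excludes use_image_id = False, where Python A returns a bare list — not a value of the
-- declared pair type — and the words starting with "<image" whose bracketed payload is not an
-- int literal, where Python A (and B) raise ValueError.
def Pre_split_model_output (gen_text : String) (use_image_id : Bool) : Prop :=
  use_image_id = true ∧
  ∀ w ∈ PySem.Str.split₀ gen_text, PySem.Str.startswith w "<image" = true →
    (PySem.Int.ofStr? (PySem.Str.slice w (some 6) (some (-1)))).isSome = true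
instance (gen_text : String) (use_image_id : Bool) : Decidable (Pre_split_model_output gen_text use_image_id) := by unfold Pre_split_model_output; infer_instance

def pvWitness_split_model_output : String × Bool := ("a b <image3> c <image1> <image2>", true)

def Spec_split_model_output (gen_text : String) (use_image_id : Bool) (out : List String × List Int) : Prop := out = split_model_output_alt gen_text use_image_id
instance (gen_text : String) (use_image_id : Bool) (out : List String × List Int) : Decidable (Spec_split_model_output gen_text use_image_id out) := by unfold Spec_split_model_output; infer_instance

-- ===== CLAIM (what is proved, stated in full; the proofs are below) =====
def Claim_equal_split_model_output : Prop := ∀ (gen_text : String) (use_image_id : Bool), Dom_split_model_output gen_text use_image_id → Pre_split_model_output gen_text use_image_id → Spec_split_model_output gen_text use_image_id (split_model_output gen_text use_image_id)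

-- ===== LEMMAS AND PROOFS =====

-- unfolding pvGoB when every remaining word is a non-image word
theorem pvGoB_all_neg (splits : List String) (order : List Int) (rest : List String)
    (h : ∀ w ∈ rest, pvStarts w = false) :
    pvGoB splits order rest
      = (if rest.isEmpty then splits else splits ++ [PySem.Str.join " " rest], order) := by
  have hd : rest.dropWhile (fun w => !pvStarts w) = [] := by
    simpa [List.dropWhile_eq_nil_iff] using fun w hw => by simp [h w hw]
  rw [pvGoB]
  split
  · simp
  · next heq => rw [hd] at heq; cases heq

-- unfolding pvGoB at a cut: a non-image prefix, then an image token
theorem pvGoB_cut (splits : List String) (order : List Int) (cache : List String)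
    (w : String) (ws : List String)
    (hc : ∀ c ∈ cache, pvStarts c = false) (hw : pvStarts w = true) :
    pvGoB splits order (cache ++ w :: ws)
      = pvGoB (splits ++ [PySem.Str.join " " cache]) (order ++ [pvParse w]) ws := by
  have ht : (cache ++ w :: ws).takeWhile (fun w => !pvStarts w) = cache := by
    rw [List.takeWhile_append]
    simp [hw]
    exact fun _ => hc
  have hd : (cache ++ w :: ws).dropWhile (fun w => !pvStarts w) = w :: ws := by
    rw [List.dropWhile_append]
    simp [hw]
    exact fun _ _ _ => hc
  rw [pvGoB]
  split
  · next heq => rw [hd] at heq; cases heq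
  · next w1 rest' heq =>
      rw [hd] at heq
      injection heq with h1 h2
      subst h1; subst h2
      rw [ht]

-- A's finalization of the loop state
def pvFinA (st : List String × List Int × List String) : List String × List Int :=
  (if st.2.2.isEmpty then st.1 else st.1 ++ [PySem.Str.join " " st.2.2], st.2.1)

-- main invariant: A's fold with pending cache equals B's cut loop on cache ++ words
theorem pvLoop_eq (words : List String) : ∀ (splits : List String) (order : List Int)
    (cache : List String), (∀ c ∈ cache, pvStarts c = false) →
    pvFinA (words.foldl pvStepA (splits, order, cache)) = pvGoB splits order (cache ++ words) := by
  induction words with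
  | nil =>
    intro splits order cache hc
    simp only [List.append_nil, List.foldl_nil]
    rw [pvGoB_all_neg _ _ _ hc]
    simp [pvFinA]
  | cons w ws ih =>
    intro splits order cache hc
    by_cases hw : pvStarts w = true
    · rw [pvGoB_cut _ _ _ _ _ hc hw]
      simpa [pvStepA, hw] using ih (splits ++ [PySem.Str.join " " cache]) (order ++ [pvParse w]) [] (by simp)
    · have hw' : pvStarts w = false := by simpa using hw
      have : cache ++ w :: ws = (cache ++ [w]) ++ ws := by simp
      rw [this]
      have hc' : ∀ c ∈ cache ++ [w], pvStarts c = false := by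
        intro c hcm
        rcases List.mem_append.1 hcm with h1 | h1
        · exact hc c h1
        · simp at h1; simpa [h1] using hw'
      simpa [pvStepA, hw'] using ih splits order (cache ++ [w]) hc'

-- ===== VERDICT (by name: the statement is the Claim_ definition above) =====
theorem split_model_output_spec : Claim_equal_split_model_output := by
  intro gen_text use_image_id _ hpre
  obtain ⟨hu, -⟩ := hpre
  show _ = _
  subst hu
  simpa [split_model_output, split_model_output_alt, pvFinA] using
    pvLoop_eq (PySem.Str.split₀ gen_text) [] [] [] (by simp)
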